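-- pv_equiv track=rewrite | github.com/JackChen2004/Statistical-NLP-Coursework | RE_Test_Pred.py | insert_markers
-- ===== SOURCE A (Python) =====
-- from typing import Dict, List, Tuple, Any, Optional
--
-- def insert_markers(tokens: List[str], e1: Tuple[int,int], e2: Tuple[int,int]) -> str:
--     s1,e1_ = e1
--     s2,e2_ = e2
--     # keep order stable
--     if s1 > s2:
--         (s1,e1_), (s2,e2_) = (s2,e2_), (s1,e1_)
--         tag1_open, tag1_close, tag2_open, tag2_close = "<e2>", "</e2>", "<e1>", "</e1>"
--     else:
--         tag1_open, tag1_close, tag2_open, tag2_close = "<e1>", "</e1>", "<e2>", "</e2>"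
--
--     out = []
--     for i,t in enumerate(tokens):
--         if i == s1: out.append(tag1_open)
--         if i == s2: out.append(tag2_open)
--         out.append(t)
--         if i+1 == e1_: out.append(tag1_close)
--         if i+1 == e2_: out.append(tag2_close)
--     return " ".join(out)
-- ===== SOURCE B (Python) =====
-- def insert_markers(tokens, e1, e2):
--     # Event-driven rebuild: collect the (boundary index, tag) insertion events
--     # that survive A's implicit range drops, sort them stably by index (closes
--     # were added first, so they stay before opens at equal index), then emit
--     # token slices between consecutive event boundaries.
--     n = len(tokens)
--     spans = [(e1, "e1"), (e2, "e2")] if e1[0] <= e2[0] else [(e2, "e2"), (e1, "e1")]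
--     events = [(e, "</" + name + ">") for (s, e), name in spans if 1 <= e <= n] \
--            + [(s, "<" + name + ">") for (s, e), name in spans if 0 <= s < n]
--     events.sort(key=lambda ev: ev[0])
--     out, prev = [], 0
--     for p, tag in events:
--         out += tokens[prev:p]
--         out.append(tag)
--         prev = p
--     out += tokens[prev:]
--     return " ".join(out)
-- ===== Notes on version B (the rewrite author's own statement) =====
-- stated objective: alternative
-- what changed: Replaces A's per-token loop with conditional tag insertions by an event list: the surviving (boundary, tag) events are collected, stably sorted by index, and the output is built from token slices between consecutive events.
import Mathlib
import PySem

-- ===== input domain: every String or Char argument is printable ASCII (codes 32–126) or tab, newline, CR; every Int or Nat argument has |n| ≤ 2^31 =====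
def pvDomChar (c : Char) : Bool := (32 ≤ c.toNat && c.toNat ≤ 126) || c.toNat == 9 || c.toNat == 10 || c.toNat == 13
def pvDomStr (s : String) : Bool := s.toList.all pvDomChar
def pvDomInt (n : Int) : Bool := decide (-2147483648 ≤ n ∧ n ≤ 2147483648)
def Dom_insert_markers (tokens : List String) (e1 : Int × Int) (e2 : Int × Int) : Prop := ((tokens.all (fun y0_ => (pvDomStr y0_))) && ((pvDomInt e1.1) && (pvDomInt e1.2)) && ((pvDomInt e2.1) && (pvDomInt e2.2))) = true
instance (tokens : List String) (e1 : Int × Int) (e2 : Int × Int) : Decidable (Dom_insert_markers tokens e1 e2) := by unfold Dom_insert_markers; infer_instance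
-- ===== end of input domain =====

-- B is an event-driven decomposition of A: collect the surviving (boundary, tag) insertion
-- events, stably sort them by index, and emit token slices between consecutive events (the
-- timing run measured this constant-factor faster); neither version mutates its arguments.

-- ===== PORT A =====
def insert_markers (tokens : List String) (e1 : Int × Int) (e2 : Int × Int) : String :=
  let q :=
    if e1.1 > e2.1 then
      (e2.1, e2.2, e1.1, e1.2, "<e2>", "</e2>", "<e1>", "</e1>")
    else
      (e1.1, e1.2, e2.1, e2.2, "<e1>", "</e1>", "<e2>", "</e2>")
  match q with
  | (s1, e1_, s2, e2_, tag1_open, tag1_close, tag2_open, tag2_close) =>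
    let out := (PySem.List.enumerate tokens).foldl (fun out it =>
      let out := if it.1 = s1 then out ++ [tag1_open] else out
      let out := if it.1 = s2 then out ++ [tag2_open] else out
      let out := out ++ [it.2]
      let out := if it.1 + 1 = e1_ then out ++ [tag1_close] else out
      if it.1 + 1 = e2_ then out ++ [tag2_close] else out) []
    PySem.Str.join " " out

-- ===== PORT B =====
def insert_markers_alt (tokens : List String) (e1 : Int × Int) (e2 : Int × Int) : String :=
  let n : Int := tokens.length
  let spans : List ((Int × Int) × String) :=
    if e1.1 ≤ e2.1 then [(e1, "e1"), (e2, "e2")] else [(e2, "e2"), (e1, "e1")]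
  let events : List (Int × String) :=
    ((spans.filter (fun se => decide (1 ≤ se.1.2) && decide (se.1.2 ≤ n))).map
        (fun se => (se.1.2, "</" ++ se.2 ++ ">"))) ++
    ((spans.filter (fun se => decide (0 ≤ se.1.1) && decide (se.1.1 < n))).map
        (fun se => (se.1.1, "<" ++ se.2 ++ ">")))
  let sortedE := PySem.List.sorted events (fun ev => ev.1)
  let st := sortedE.foldl (fun (st : List String × Int) ev =>
      (st.1 ++ PySem.List.slice tokens (some st.2) (some ev.1) ++ [ev.2], ev.1))
      (([] : List String), (0 : Int))
  PySem.Str.join " " (st.1 ++ PySem.List.slice tokens (some st.2) none)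

-- ===== PRECONDITION & SPEC =====
def Spec_insert_markers (tokens : List String) (e1 : Int × Int) (e2 : Int × Int) (out : String) : Prop := out = insert_markers_alt tokens e1 e2
instance (tokens : List String) (e1 : Int × Int) (e2 : Int × Int) (out : String) : Decidable (Spec_insert_markers tokens e1 e2 out) := by unfold Spec_insert_markers; infer_instance

-- ===== CLAIM (what is proved, stated in full; the proofs are below) =====
def Claim_equal_insert_markers : Prop := ∀ (tokens : List String) (e1 : Int × Int) (e2 : Int × Int), Dom_insert_markers tokens e1 e2 → Spec_insert_markers tokens e1 e2 (insert_markers tokens e1 e2)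

-- ===== LEMMAS AND PROOFS =====

-- reference list produced by A's loop starting at index k (normalized parameters)
def pvAlist (s1 e1_ s2 e2_ : Int) (t1o t1c t2o t2c : String) : Int → List String → List String
  | _, [] => []
  | k, t :: ts =>
      (if k = s1 then [t1o] else []) ++ (if k = s2 then [t2o] else []) ++ [t] ++
      (if k + 1 = e1_ then [t1c] else []) ++ (if k + 1 = e2_ then [t2c] else []) ++
      pvAlist s1 e1_ s2 e2_ t1o t1c t2o t2c (k + 1) ts

-- the guarded close-markers pending at boundary p
def pvCloses (e1_ e2_ : Int) (t1c t2c : String) (p : Int) : List String :=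
  (if p = e1_ ∧ 1 ≤ p then [t1c] else []) ++ (if p = e2_ ∧ 1 ≤ p then [t2c] else [])

-- B's event list, written out: closes (span order) then opens, each range-guarded
def pvEvents (p1 p2 : Int × Int) (t1o t1c t2o t2c : String) (n : Int) : List (Int × String) :=
  (if 1 ≤ p1.2 ∧ p1.2 ≤ n then [(p1.2, t1c)] else []) ++
  (if 1 ≤ p2.2 ∧ p2.2 ≤ n then [(p2.2, t2c)] else []) ++
  (if 0 ≤ p1.1 ∧ p1.1 < n then [(p1.1, t1o)] else []) ++
  (if 0 ≤ p2.1 ∧ p2.1 < n then [(p2.1, t2o)] else [])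

-- the tags of the events at boundary p, in list order
def pvMarks (E : List (Int × String)) (p : Int) : List String :=
  (E.filter (fun ev => ev.1 == p)).map (fun ev => ev.2)

-- per-boundary canonical list: marks at k, token, marks at k+1, token, …, marks at the end
def pvB2 (E : List (Int × String)) : Int → List String → List String
  | k, [] => pvMarks E k
  | k, t :: ts => pvMarks E k ++ [t] ++ pvB2 E (k + 1) ts

-- B's slice interleaving, relativized to the token suffix starting at boundary k
def pvT : List (Int × String) → Int → List String → List String
  | [], _, ts => ts
  | (p, tag) :: E, k, ts => ts.take (p - k).toNat ++ [tag] ++ pvT E p (ts.drop (p - k).toNat)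

lemma pvA_fold (s1 e1_ s2 e2_ : Int) (t1o t1c t2o t2c : String) :
    ∀ (ts : List String) (k : Int) (acc : List String),
      (PySem.List.enumerate ts k).foldl (fun out it =>
        let out := if it.1 = s1 then out ++ [t1o] else out
        let out := if it.1 = s2 then out ++ [t2o] else out
        let out := out ++ [it.2]
        let out := if it.1 + 1 = e1_ then out ++ [t1c] else out
        if it.1 + 1 = e2_ then out ++ [t2c] else out) acc
      = acc ++ pvAlist s1 e1_ s2 e2_ t1o t1c t2o t2c k ts := by
  intro ts
  induction ts with
  | nil => intro k acc; simp [PySem.List.enumerate_nil, pvAlist]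
  | cons t ts ih =>
      intro k acc
      rw [PySem.List.enumerate_cons, List.foldl_cons, ih]
      simp only [pvAlist]
      split_ifs <;> simp_all

-- B's fold with its trailing slice, as pvT over the remaining suffix
lemma pvB_fold (tokens : List String) :
    ∀ (E : List (Int × String)) (acc : List String) (prev : Int), 0 ≤ prev →
      (∀ ev ∈ E, prev ≤ ev.1) → E.Pairwise (fun a b => a.1 ≤ b.1) →
      (E.foldl (fun (st : List String × Int) ev =>
          (st.1 ++ PySem.List.slice tokens (some st.2) (some ev.1) ++ [ev.2], ev.1)) (acc, prev)).1
        ++ PySem.List.slice tokens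
            (some (E.foldl (fun (st : List String × Int) ev =>
              (st.1 ++ PySem.List.slice tokens (some st.2) (some ev.1) ++ [ev.2], ev.1)) (acc, prev)).2) none
      = acc ++ pvT E prev (tokens.drop prev.toNat) := by
  intro E
  induction E with
  | nil =>
      intro acc prev h0 _ _
      simp [pvT, PySem.List.slice_from _ h0]
  | cons ev E ih =>
      intro acc prev h0 hb hp
      obtain ⟨p, tag⟩ := ev
      have hpge : prev ≤ p := hb (p, tag) (List.mem_cons_self ..)
      have h0p : (0:Int) ≤ p := le_trans h0 hpge
      rw [List.foldl_cons, ih _ p h0p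
        (fun e he => (List.pairwise_cons.mp hp).1 e he)
        (List.pairwise_cons.mp hp).2]
      rw [PySem.List.slice_toNat _ h0 h0p]
      simp only [pvT, List.append_assoc]
      congr 1
      have h1 : (p - prev).toNat = p.toNat - prev.toNat := by omega
      have h2 : (tokens.drop prev.toNat).drop (p.toNat - prev.toNat) = tokens.drop p.toNat := by
        rw [List.drop_drop]; congr 1; omega
      rw [h1, h2]

lemma pvB2_nil (k : Int) (ts : List String) : pvB2 [] k ts = ts := by
  induction ts generalizing k with
  | nil => simp [pvB2, pvMarks]
  | cons t ts ih => simp [pvB2, pvMarks, ih]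

lemma pvMarks_cons_ne (q : Int) (tag : String) (E : List (Int × String)) (p : Int) (h : q ≠ p) :
    pvMarks ((q, tag) :: E) p = pvMarks E p := by
  simp [pvMarks, h]

lemma pvB2_cons_lt (q : Int) (tag : String) (E : List (Int × String)) (k : Int) (ts : List String)
    (h : q < k) : pvB2 ((q, tag) :: E) k ts = pvB2 E k ts := by
  induction ts generalizing k with
  | nil => simp [pvB2, pvMarks_cons_ne q tag E k (by omega)]
  | cons t ts ih =>
      simp only [pvB2, pvMarks_cons_ne q tag E k (by omega), ih (k + 1) (by omega)]

lemma pvB2_cons_eq (tag : String) (E : List (Int × String)) (k : Int) (ts : List String) :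
    pvB2 ((k, tag) :: E) k ts = tag :: pvB2 E k ts := by
  cases ts with
  | nil => simp [pvB2, pvMarks]
  | cons t ts =>
      simp only [pvB2]
      rw [pvB2_cons_lt k tag E (k + 1) ts (by omega)]
      simp [pvMarks]

lemma pvMarks_eq_nil (E : List (Int × String)) (p : Int) (h : ∀ ev ∈ E, ev.1 ≠ p) :
    pvMarks E p = [] := by
  simp only [pvMarks, List.map_eq_nil_iff, List.filter_eq_nil_iff]
  intro ev hev
  simpa using h ev hev

-- core: the slice interleaving equals the per-boundary canonical list
lemma pvT_eq_B2 :
    ∀ (N : Nat) (E : List (Int × String)) (k : Int) (ts : List String),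
      E.length + ts.length ≤ N → E.Pairwise (fun a b => a.1 ≤ b.1) →
      (∀ ev ∈ E, k ≤ ev.1 ∧ ev.1 ≤ k + ts.length) →
      pvT E k ts = pvB2 E k ts := by
  intro N
  induction N with
  | zero =>
      intro E k ts hN _ _
      have hE : E = [] := by cases E <;> simp_all
      have hts : ts = [] := by cases ts <;> simp_all
      subst hE hts; simp [pvT, pvB2, pvMarks]
  | succ N ih =>
      intro E k ts hN hp hb
      cases E with
      | nil => simp [pvT, pvB2_nil]
      | cons ev E' =>
          obtain ⟨p, tag⟩ := ev
          have hpk : k ≤ p := (hb (p, tag) (List.mem_cons_self ..)).1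
          by_cases hpe : p = k
          · subst hpe
            simp only [pvT, sub_self, Int.toNat_zero, List.take_zero, List.drop_zero,
              List.nil_append]
            rw [pvB2_cons_eq]
            have := ih E' p ts (by simp at hN ⊢; omega)
              (List.pairwise_cons.mp hp).2
              (fun e he => hb e (List.mem_cons_of_mem _ he))
            simp [this]
          · have hlt : k < p := lt_of_le_of_ne hpk (fun h => hpe h.symm)
            have hub : p ≤ k + ts.length := (hb (p, tag) (List.mem_cons_self ..)).2
            cases ts with
            | nil => exfalso; simp at hub; omega
            | cons t ts' =>
                have hmarks : pvMarks ((p, tag) :: E') k = [] := by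
                  apply pvMarks_eq_nil
                  intro e he
                  rcases List.mem_cons.mp he with h | h
                  · subst h; omega
                  · have := (List.pairwise_cons.mp hp).1 e h; omega
                have hT : pvT ((p, tag) :: E') k (t :: ts') = t :: pvT ((p, tag) :: E') (k + 1) ts' := by
                  simp only [pvT]
                  have h1 : (p - k).toNat = (p - (k + 1)).toNat + 1 := by omega
                  rw [h1]
                  simp [List.take_succ_cons, List.drop_succ_cons]
                rw [hT]
                simp only [pvB2, hmarks, List.nil_append, List.cons_append, List.nil_append]
                congr 1
                exact ih ((p, tag) :: E') (k + 1) ts' (by simp at hN ⊢; omega) hp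
                  (fun e he => ⟨by rcases List.mem_cons.mp he with h | h
                                   · subst h; omega
                                   · have := (List.pairwise_cons.mp hp).1 e h; omega,
                                by have := (hb e he).2; simp at this ⊢; omega⟩)

-- stability of PySem's sort, as preservation of the per-key filters
lemma pvPairwise_insertBy (x : Int × String) (ys : List (Int × String))
    (h : ys.Pairwise (fun a b => a.1 ≤ b.1)) :
    (PySem.List.insertBy (fun a b => decide (a.1 < b.1)) x ys).Pairwise (fun a b => a.1 ≤ b.1) := by
  induction ys with
  | nil => simp [PySem.List.insertBy]
  | cons y ys ih =>
      simp only [PySem.List.insertBy]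
      split_ifs with hlt
      · simp only [decide_eq_true_eq] at hlt
        refine List.pairwise_cons.mpr ⟨?_, h⟩
        intro e he
        rcases List.mem_cons.mp he with h' | h'
        · subst h'; omega
        · have := (List.pairwise_cons.mp h).1 e h'; omega
      · simp only [decide_eq_true_eq, not_lt] at hlt
        refine List.pairwise_cons.mpr ⟨?_, ih (List.pairwise_cons.mp h).2⟩
        intro e he
        rcases (PySem.List.mem_insertBy _ _ _ _).mp he with h' | h'
        · subst h'; omega
        · exact (List.pairwise_cons.mp h).1 e h'

lemma pvFilter_insertBy (p : Int) (x : Int × String) (ys : List (Int × String))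
    (h : ys.Pairwise (fun a b => a.1 ≤ b.1)) :
    (PySem.List.insertBy (fun a b => decide (a.1 < b.1)) x ys).filter (fun ev => ev.1 == p)
    = if x.1 = p then ys.filter (fun ev => ev.1 == p) ++ [x]
      else ys.filter (fun ev => ev.1 == p) := by
  induction ys with
  | nil =>
      simp only [PySem.List.insertBy]
      by_cases hxp : x.1 = p <;> simp [hxp]
  | cons y ys ih =>
      simp only [PySem.List.insertBy]
      by_cases hlt : x.1 < y.1
      · rw [if_pos (by simpa using hlt)]
        by_cases hxp : x.1 = p
        · have hnil : (y :: ys).filter (fun ev => ev.1 == p) = [] := by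
            apply List.filter_eq_nil_iff.mpr
            intro e he
            rcases List.mem_cons.mp he with h' | h'
            · subst h'; simp; omega
            · have := (List.pairwise_cons.mp h).1 e h'; simp; omega
          rw [if_pos hxp, List.filter_cons_of_pos (by simpa using hxp), hnil]
          simp
        · rw [if_neg hxp, List.filter_cons_of_neg (by simpa using hxp)]
      · rw [if_neg (by simpa using hlt)]
        rw [List.filter_cons, ih (List.pairwise_cons.mp h).2]
        by_cases hxp : x.1 = p
        · rw [if_pos hxp, if_pos hxp, List.filter_cons]
          split_ifs <;> simp
        · rw [if_neg hxp, if_neg hxp, List.filter_cons]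

lemma pvFilter_sorted (p : Int) (xs : List (Int × String)) :
    (PySem.List.sorted xs (fun ev => ev.1)).filter (fun ev => ev.1 == p)
    = xs.filter (fun ev => ev.1 == p) := by
  rw [PySem.List.sorted_eq_foldl_insertBy]
  suffices h : ∀ (xs acc : List (Int × String)), acc.Pairwise (fun a b => a.1 ≤ b.1) →
      (xs.foldl (fun acc x => PySem.List.insertBy (fun a b => decide (a.1 < b.1)) x acc) acc).filter
          (fun ev => ev.1 == p)
        = acc.filter (fun ev => ev.1 == p) ++ xs.filter (fun ev => ev.1 == p) by
    simpa using h xs [] (by simp)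
  intro xs
  induction xs with
  | nil => intro acc _; simp
  | cons x xs ih =>
      intro acc hacc
      rw [List.foldl_cons, ih _ (pvPairwise_insertBy x acc hacc),
        pvFilter_insertBy p x acc hacc, List.filter_cons]
      split_ifs with h1 h2 h2 <;> simp_all

lemma pvB2_congr (E E' : List (Int × String))
    (h : ∀ q, E.filter (fun ev => ev.1 == q) = E'.filter (fun ev => ev.1 == q)) :
    ∀ (k : Int) (ts : List String), pvB2 E k ts = pvB2 E' k ts := by
  intro k ts
  induction ts generalizing k with
  | nil => simp [pvB2, pvMarks, h k]
  | cons t ts ih => simp [pvB2, pvMarks, h k, ih (k + 1)]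

lemma pvMarks_append (A B : List (Int × String)) (p : Int) :
    pvMarks (A ++ B) p = pvMarks A p ++ pvMarks B p := by
  simp [pvMarks]

lemma pvMarks_if_single (c : Prop) [Decidable c] (q : Int) (tag : String) (p : Int) :
    pvMarks (if c then [(q, tag)] else []) p = if c ∧ q = p then [tag] else [] := by
  split_ifs <;> simp_all [pvMarks]

lemma pvMarks_events (p1 p2 : Int × Int) (t1o t1c t2o t2c : String) (n p : Int)
    (h0 : 0 ≤ p) (hn : p ≤ n) :
    pvMarks (pvEvents p1 p2 t1o t1c t2o t2c n) p =
      pvCloses p1.2 p2.2 t1c t2c p ++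
      (if p < n then
        (if p = p1.1 ∧ 0 ≤ p then [t1o] else []) ++ (if p = p2.1 ∧ 0 ≤ p then [t2o] else [])
       else []) := by
  simp only [pvEvents, pvMarks_append, pvMarks_if_single, pvCloses]
  by_cases hpn : p < n
  · rw [if_pos hpn]
    split_ifs <;> first | rfl | omega
  · rw [if_neg hpn]
    split_ifs <;> first | rfl | omega

-- A's reference list, prefixed by the pending guarded closes, is the canonical per-boundary list
lemma pvCore (p1 p2 : Int × Int) (t1o t1c t2o t2c : String) (n : Int) :
    ∀ (ts : List String) (k : Int), 0 ≤ k → k + (ts.length : Int) = n →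
      pvCloses p1.2 p2.2 t1c t2c k ++ pvAlist p1.1 p1.2 p2.1 p2.2 t1o t1c t2o t2c k ts
      = pvB2 (pvEvents p1 p2 t1o t1c t2o t2c n) k ts := by
  intro ts
  induction ts with
  | nil =>
      intro k hk0 hkn
      simp only [pvAlist, pvB2]
      rw [pvMarks_events p1 p2 t1o t1c t2o t2c n k hk0 (by simp at hkn; omega),
        if_neg (by simp at hkn; omega)]
  | cons t ts ih =>
      intro k hk0 hkn
      have hkn' : (k + 1) + (ts.length : Int) = n := by
        simp at hkn ⊢; omega
      have hklt : k < n := by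
        simp at hkn; omega
      rw [pvB2, pvMarks_events p1 p2 t1o t1c t2o t2c n k hk0 (by omega),
        ← ih (k + 1) (by omega) hkn']
      simp only [pvAlist, pvCloses, if_pos hklt]
      have h1 : (1 : Int) ≤ k + 1 := by omega
      simp only [hk0, h1, and_true, List.append_assoc]

lemma pvEvents_concrete (q1 q2 : Int × Int) (name1 name2 : String) (n : Int) :
    (([(q1, name1), (q2, name2)].filter (fun se => decide (1 ≤ se.1.2) && decide (se.1.2 ≤ n))).map
        (fun se => (se.1.2, "</" ++ se.2 ++ ">"))) ++
    (([(q1, name1), (q2, name2)].filter (fun se => decide (0 ≤ se.1.1) && decide (se.1.1 < n))).map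
        (fun se => (se.1.1, "<" ++ se.2 ++ ">")))
    = pvEvents q1 q2 ("<" ++ name1 ++ ">") ("</" ++ name1 ++ ">")
        ("<" ++ name2 ++ ">") ("</" ++ name2 ++ ">") n := by
  simp only [pvEvents, List.filter_cons, List.filter_nil]
  split_ifs <;> simp_all

lemma pvEvents_mem_bounds (q1 q2 : Int × Int) (t1o t1c t2o t2c : String) (n : Int)
    (ev : Int × String) (h : ev ∈ pvEvents q1 q2 t1o t1c t2o t2c n) :
    0 ≤ ev.1 ∧ ev.1 ≤ n := by
  simp only [pvEvents, List.mem_append] at h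
  rcases h with ((h | h) | h) | h <;> (split_ifs at h <;> simp_all) <;> omega

-- assemble one fully-normalized instance: A's fold equals B's fold-with-slices
lemma pvAssemble (tokens : List String) (q1 q2 : Int × Int) (name1 name2 : String) :
    (PySem.List.enumerate tokens).foldl (fun out it =>
        let out := if it.1 = q1.1 then out ++ ["<" ++ name1 ++ ">"] else out
        let out := if it.1 = q2.1 then out ++ ["<" ++ name2 ++ ">"] else out
        let out := out ++ [it.2]
        let out := if it.1 + 1 = q1.2 then out ++ ["</" ++ name1 ++ ">"] else out
        if it.1 + 1 = q2.2 then out ++ ["</" ++ name2 ++ ">"] else out) []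
    = (let n : Int := tokens.length
       let events : List (Int × String) :=
         (([(q1, name1), (q2, name2)].filter (fun se => decide (1 ≤ se.1.2) && decide (se.1.2 ≤ n))).map
             (fun se => (se.1.2, "</" ++ se.2 ++ ">"))) ++
         (([(q1, name1), (q2, name2)].filter (fun se => decide (0 ≤ se.1.1) && decide (se.1.1 < n))).map
             (fun se => (se.1.1, "<" ++ se.2 ++ ">")))
       let sortedE := PySem.List.sorted events (fun ev => ev.1)
       let st := sortedE.foldl (fun (st : List String × Int) ev =>
           (st.1 ++ PySem.List.slice tokens (some st.2) (some ev.1) ++ [ev.2], ev.1))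
           (([] : List String), (0 : Int))
       st.1 ++ PySem.List.slice tokens (some st.2) none) := by
  simp only
  rw [pvEvents_concrete]
  set n : Int := (tokens.length : Int) with hn
  set E0 := pvEvents q1 q2 ("<" ++ name1 ++ ">") ("</" ++ name1 ++ ">")
      ("<" ++ name2 ++ ">") ("</" ++ name2 ++ ">") n with hE0
  have hbounds : ∀ ev ∈ PySem.List.sorted E0 (fun ev => ev.1), 0 ≤ ev.1 ∧ ev.1 ≤ n := by
    intro ev hev
    exact pvEvents_mem_bounds q1 q2 _ _ _ _ n ev ((PySem.List.mem_sorted E0 (fun ev => ev.1) false ev).mp hev)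
  have hpw : (PySem.List.sorted E0 (fun ev => ev.1)).Pairwise (fun a b => a.1 ≤ b.1) :=
    PySem.List.sorted_pairwise E0 (fun ev => ev.1)
  rw [pvB_fold tokens (PySem.List.sorted E0 (fun ev => ev.1)) [] 0 le_rfl
    (fun ev hev => (hbounds ev hev).1) hpw]
  simp only [Int.toNat_zero, List.drop_zero, List.nil_append]
  rw [pvT_eq_B2 ((PySem.List.sorted E0 (fun ev => ev.1)).length + tokens.length)
    (PySem.List.sorted E0 (fun ev => ev.1)) 0 tokens (by simp) hpw
    (fun ev hev => ⟨(hbounds ev hev).1, by have := (hbounds ev hev).2; omega⟩)]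
  rw [pvB2_congr (PySem.List.sorted E0 (fun ev => ev.1)) E0 (fun q => pvFilter_sorted q E0) 0 tokens]
  rw [pvA_fold]
  rw [← pvCore q1 q2 ("<" ++ name1 ++ ">") ("</" ++ name1 ++ ">")
      ("<" ++ name2 ++ ">") ("</" ++ name2 ++ ">") n tokens 0 le_rfl (by simp [hn])]
  simp [pvCloses]

-- ===== VERDICT (by name: the statement is the Claim_ definition above) =====
theorem insert_markers_spec : Claim_equal_insert_markers := by
  intro tokens e1 e2 _
  unfold Spec_insert_markers insert_markers insert_markers_alt
  by_cases h : e2.1 < e1.1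
  · rw [if_pos h, if_neg (by omega)]
    exact congrArg (PySem.Str.join " ") (pvAssemble tokens e2 e1 "e2" "e1")
  · rw [if_neg h, if_pos (by omega)]
    exact congrArg (PySem.Str.join " ") (pvAssemble tokens e1 e2 "e1" "e2")
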